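-- pv_equiv track=rewrite | github.com/wrhm/advent_of_code | 2023/day10.py | count_3x3s
-- ===== SOURCE A (Python) =====
-- def count_3x3s(data):
--     w, h = len(data[0]), len(data)
--     boxes = 0
--     for r in range(0, h, 2):
--         # if r+2 >= h:
--         #     continue
--         for c in range(0, w, 2):
--             # if c+2 >= w:
--             #     continue
--             dots = 0
--             # for (dr, dc) in [(0, 0), (0, 1), (0, 2), (1, 0), (1, 1), (1, 2), (2, 0), (2, 1), (2, 2)]:
--             for (dr, dc) in [(-1, -1), (-1, 0), (-1, 1), (0, -1), (0, 0), (0, 1), (1, -1), (1, 0), (1, 1)]: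
--                 if not (0 <= r+dr < h and 0 <= c+dc < w):
--                     continue
--                 if data[r+dr][c+dc] == '*':
--                     dots += 1
--             if dots == 9:
--                 boxes += 1
--     return boxes
-- ===== SOURCE B (Python) =====
-- def count_3x3s(data):
--     h, w = len(data), len(data[0])
--     # horizontal pass: mask[r][c] == True iff columns c-1..c+1 exist and are all '*' in row r
--     mask = [[c >= 1 and c + 1 < w
--              and row[c - 1] == '*' and row[c] == '*' and row[c + 1] == '*'
--              for c in range(w)] for row in data]
--     boxes = 0
--     for r in range(0, h, 2):
--         for c in range(0, w, 2):
--             if 1 <= r < h - 1 and mask[r - 1][c] and mask[r][c] and mask[r + 1][c]: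
--                 boxes += 1
--     return boxes
-- ===== Notes on version B (the rewrite author's own statement) =====
-- stated objective: alternative
-- what changed: Replaces A's per-center scan of 9 bounds-checked offsets by a precomputed per-row horizontal all-'*'-triple mask (a separable-filter pass) that the center loop then combines vertically with three lookups and an interior-row test; Pre_ excludes only the inputs (empty list, a row shorter than the first row) where A raises IndexError.
import Mathlib
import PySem

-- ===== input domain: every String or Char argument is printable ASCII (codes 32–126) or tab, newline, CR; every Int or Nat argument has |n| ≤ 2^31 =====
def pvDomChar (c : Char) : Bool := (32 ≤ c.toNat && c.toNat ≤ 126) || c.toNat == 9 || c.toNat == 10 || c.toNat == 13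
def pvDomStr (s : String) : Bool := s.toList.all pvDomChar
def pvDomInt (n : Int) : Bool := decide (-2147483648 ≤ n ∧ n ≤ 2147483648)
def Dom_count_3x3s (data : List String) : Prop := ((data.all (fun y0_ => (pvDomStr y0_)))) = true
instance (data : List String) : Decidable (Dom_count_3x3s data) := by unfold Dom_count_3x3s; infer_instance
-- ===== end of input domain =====

-- B replaces A's per-center 9-cell bounds-checked scan by a precomputed horizontal
-- all-'*'-triple mask per row combined vertically at interior centers (alternative decomposition).

-- ===== PORT A =====
-- data[i][j] as an Option (none exactly where Python raises)
def pyAt (data : List String) (i j : Int) : Option Char :=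
  (PySem.List.pyGet? data i).bind (fun row => PySem.Str.pyGet? row j)

def count_3x3s (data : List String) : Int :=
  let w : Int := ((PySem.List.pyGet? data 0).map PySem.Str.len).getD 0
  let h : Int := (data.length : Int)
  (PySem.List.pyRange 0 h 2).foldl (fun boxes r =>
    (PySem.List.pyRange 0 w 2).foldl (fun boxes c =>
      let dots : Int :=
        [((-1 : Int), (-1 : Int)), (-1, 0), (-1, 1), (0, -1), (0, 0), (0, 1), (1, -1), (1, 0), (1, 1)].foldl
          (fun dots d =>
            if 0 ≤ r + d.1 ∧ r + d.1 < h ∧ 0 ≤ c + d.2 ∧ c + d.2 < w then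
              if pyAt data (r + d.1) (c + d.2) = some '*' then dots + 1 else dots
            else dots) 0
      if dots = 9 then boxes + 1 else boxes) boxes) 0

-- ===== PORT B =====
-- [c >= 1 and c+1 < w and row[c-1]=='*' and row[c]=='*' and row[c+1]=='*' for c in range(w)]
def rowMask (w : Int) (row : String) : List Bool :=
  (PySem.List.pyRange 0 w 1).map (fun c =>
    decide (c ≥ 1) && decide (c + 1 < w) &&
    (PySem.Str.pyGet? row (c - 1) == some '*') &&
    (PySem.Str.pyGet? row c == some '*') &&
    (PySem.Str.pyGet? row (c + 1) == some '*'))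

-- mask[i][j] (only ever read in range inside the guarded branch)
def maskGet (mask : List (List Bool)) (i j : Int) : Bool :=
  PySem.List.pyGetD (PySem.List.pyGetD mask i []) j false

def count_3x3s_alt (data : List String) : Int :=
  let h : Int := (data.length : Int)
  let w : Int := ((PySem.List.pyGet? data 0).map PySem.Str.len).getD 0
  let mask : List (List Bool) := data.map (rowMask w)
  (PySem.List.pyRange 0 h 2).foldl (fun boxes r =>
    (PySem.List.pyRange 0 w 2).foldl (fun boxes c =>
      if (decide (1 ≤ r) && decide (r < h - 1) &&
          maskGet mask (r - 1) c && maskGet mask r c && maskGet mask (r + 1) c) = true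
      then boxes + 1 else boxes) boxes) 0

-- ===== PRECONDITION & SPEC =====
-- Pre_ excludes exactly the inputs where Python A raises IndexError: the empty list
-- (data[0]) and grids where some row is shorter than the first row's width.
def Pre_count_3x3s (data : List String) : Prop :=
  data ≠ [] ∧ ∀ s ∈ data, ((PySem.List.pyGet? data 0).map PySem.Str.len).getD 0 ≤ PySem.Str.len s
instance (data : List String) : Decidable (Pre_count_3x3s data) := by unfold Pre_count_3x3s; infer_instance
def pvWitness_count_3x3s : List String := ["****", "****", "****", "****"]

def Spec_count_3x3s (data : List String) (out : Int) : Prop := out = count_3x3s_alt data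
instance (data : List String) (out : Int) : Decidable (Spec_count_3x3s data out) := by unfold Spec_count_3x3s; infer_instance

-- ===== CLAIM (what is proved, stated in full; the proofs are below) =====
def Claim_equal_count_3x3s : Prop := ∀ (data : List String), Dom_count_3x3s data → Pre_count_3x3s data → Spec_count_3x3s data (count_3x3s data)

-- ===== LEMMAS AND PROOFS =====

lemma ite01_nonneg_le_one (P : Prop) [Decidable P] :
    0 ≤ (if P then (1 : Int) else 0) ∧ (if P then (1 : Int) else 0) ≤ 1 := by
  split_ifs <;> omega

lemma ite01_eq_one (P : Prop) [Decidable P] :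
    ((if P then (1 : Int) else 0) = 1) ↔ P := by
  split_ifs with h <;> simp [h]

lemma step_ite (x : Int) (P Q : Prop) [Decidable P] [Decidable Q] :
    (if P then if Q then x + 1 else x else x) = x + (if P ∧ Q then 1 else 0) := by
  split_ifs <;> simp_all

lemma sum9 {i1 i2 i3 i4 i5 i6 i7 i8 i9 : Int}
    (h1 : 0 ≤ i1 ∧ i1 ≤ 1) (h2 : 0 ≤ i2 ∧ i2 ≤ 1) (h3 : 0 ≤ i3 ∧ i3 ≤ 1)
    (h4 : 0 ≤ i4 ∧ i4 ≤ 1) (h5 : 0 ≤ i5 ∧ i5 ≤ 1) (h6 : 0 ≤ i6 ∧ i6 ≤ 1)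
    (h7 : 0 ≤ i7 ∧ i7 ≤ 1) (h8 : 0 ≤ i8 ∧ i8 ≤ 1) (h9 : 0 ≤ i9 ∧ i9 ≤ 1) :
    (0 + i1 + i2 + i3 + i4 + i5 + i6 + i7 + i8 + i9 = 9) ↔
      (i1 = 1 ∧ i2 = 1 ∧ i3 = 1 ∧ i4 = 1 ∧ i5 = 1 ∧ i6 = 1 ∧ i7 = 1 ∧ i8 = 1 ∧ i9 = 1) := by
  omega

lemma pyAt_eq (data : List String) (i j : Int) (h0 : 0 ≤ i) (h1 : i < (data.length : Int)) :
    pyAt data i j = PySem.Str.pyGet? (data.getD i.toNat "") j := by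
  have : i = ((i.toNat : Nat) : Int) := by omega
  rw [pyAt, this, PySem.List.pyGet?_natCast]
  have hlt : i.toNat < data.length := by omega
  simp [List.getD_eq_getElem?_getD, hlt, max_eq_left h0]

lemma maskGet_eq (data : List String) (w i j : Int)
    (hi0 : 0 ≤ i) (hi1 : i < (data.length : Int)) (hj0 : 0 ≤ j) (hj1 : j < w) :
    maskGet (data.map (rowMask w)) i j =
      (decide (j ≥ 1) && decide (j + 1 < w) &&
       (PySem.Str.pyGet? (data.getD i.toNat "") (j - 1) == some '*') &&
       (PySem.Str.pyGet? (data.getD i.toNat "") j == some '*') &&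
       (PySem.Str.pyGet? (data.getD i.toNat "") (j + 1) == some '*')) := by
  have hlt : i.toNat < data.length := by omega
  have hrow : PySem.List.pyGetD (data.map (rowMask w)) i [] = rowMask w (data.getD i.toNat "") := by
    rw [PySem.List.pyGetD_of_nonneg _ _ hi0]
    simp [List.getD_eq_getElem?_getD, List.getElem?_map, List.getElem?_eq_getElem hlt]
  have hw : w = ((w.toNat : Nat) : Int) := by omega
  have hj : j = ((j.toNat : Nat) : Int) := by omega
  rw [maskGet, hrow, rowMask]
  rw [hw, hj, PySem.List.pyGetD_map_pyRange _ _ _ _ (by omega)]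

-- ===== VERDICT (by name: the statement is the Claim_ definition above) =====
theorem count_3x3s_spec : Claim_equal_count_3x3s := by
  intro data _ hpre
  unfold Spec_count_3x3s count_3x3s count_3x3s_alt
  apply PySem.List.foldl_congr_mem
  intro boxes r hr
  rw [PySem.List.mem_pyRange_iff_of_pos (by omega)] at hr
  apply PySem.List.foldl_congr_mem
  intro acc c hc
  rw [PySem.List.mem_pyRange_iff_of_pos (by omega)] at hc
  simp only [List.foldl_cons, List.foldl_nil, step_ite,
    show ∀ x : Int, x + -1 = x - 1 from fun x => by ring, add_zero]
  refine if_congr ?_ rfl rfl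
  rw [sum9 (ite01_nonneg_le_one _) (ite01_nonneg_le_one _) (ite01_nonneg_le_one _)
      (ite01_nonneg_le_one _) (ite01_nonneg_le_one _) (ite01_nonneg_le_one _)
      (ite01_nonneg_le_one _) (ite01_nonneg_le_one _) (ite01_nonneg_le_one _)]
  simp only [ite01_eq_one]
  by_cases hG : 1 ≤ r ∧ r + 1 < (data.length : Int)
  · obtain ⟨hg1, hg2⟩ := hG
    rw [pyAt_eq data (r - 1) (c - 1) (by omega) (by omega),
        pyAt_eq data (r - 1) c (by omega) (by omega),
        pyAt_eq data (r - 1) (c + 1) (by omega) (by omega),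
        pyAt_eq data r (c - 1) (by omega) (by omega),
        pyAt_eq data r c (by omega) (by omega),
        pyAt_eq data r (c + 1) (by omega) (by omega),
        pyAt_eq data (r + 1) (c - 1) (by omega) (by omega),
        pyAt_eq data (r + 1) c (by omega) (by omega),
        pyAt_eq data (r + 1) (c + 1) (by omega) (by omega),
        maskGet_eq data _ (r - 1) c (by omega) (by omega) (by omega) (by omega),
        maskGet_eq data _ r c (by omega) (by omega) (by omega) (by omega),
        maskGet_eq data _ (r + 1) c (by omega) (by omega) (by omega) (by omega)]
    simp only [Bool.and_eq_true, decide_eq_true_eq, beq_iff_eq, and_assoc]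
    constructor
    · rintro ⟨b1a, b1b, b1c, b1d, s1, b2a, b2b, b2c, b2d, s2, b3a, b3b, b3c, b3d, s3,
              b4a, b4b, b4c, b4d, s4, b5a, b5b, b5c, b5d, s5, b6a, b6b, b6c, b6d, s6,
              b7a, b7b, b7c, b7d, s7, b8a, b8b, b8c, b8d, s8, b9a, b9b, b9c, b9d, s9⟩
      exact ⟨by omega, by omega, by omega, by omega, s1, s2, s3,
             by omega, by omega, s4, s5, s6, by omega, by omega, s7, s8, s9⟩
    · rintro ⟨g1, g2, m1a, m1b, t1, t2, t3, m2a, m2b, t4, t5, t6, m3a, m3b, t7, t8, t9⟩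
      exact ⟨by omega, by omega, by omega, by omega, t1,
             by omega, by omega, by omega, by omega, t2,
             by omega, by omega, by omega, by omega, t3,
             by omega, by omega, by omega, by omega, t4,
             by omega, by omega, by omega, by omega, t5,
             by omega, by omega, by omega, by omega, t6,
             by omega, by omega, by omega, by omega, t7,
             by omega, by omega, by omega, by omega, t8,
             by omega, by omega, by omega, by omega, t9⟩
  · simp only [Bool.and_eq_true, decide_eq_true_eq, and_assoc]
    constructor
    · rintro ⟨hb1, -, -, -, -, -, -, -, -, -, -, -, -, -, -,
              -, -, -, -, -, -, -, -, -, -, -, -, -, -, -,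
              -, hb7, -, -, -, -, -, -, -, -, -, -, -, -, -⟩
      exact absurd ⟨by omega, by omega⟩ hG
    · rintro ⟨g1, g2, -, -, -⟩
      exact absurd ⟨g1, by omega⟩ hG
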